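-- pv_equiv track=rewrite | github.com/Freddereck/debianhelper | modules/software_manager.py | _parse_xui_settings
-- ===== SOURCE A (Python) =====
-- def _parse_xui_settings(settings_text):
--     """Парсит вывод x-ui settings и возвращает port, webBasePath, access_url."""
--     import re
--     port = None
--     webpath = None
--     access_url = None
--     for line in settings_text.splitlines():
--         if line.strip().startswith("port:"):
--             port = line.split(":",1)[1].strip()
--         elif line.strip().startswith("webBasePath:"):
--             webpath = line.split(":",1)[1].strip().strip('/')
--         elif line.strip().startswith("Access URL:"):
--             access_url = line.split(":",1)[1].strip()
--     return port, webpath, access_url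
-- ===== SOURCE B (Python) =====
-- def _parse_xui_settings(settings_text):
--     """Three independent last-match scans from the end of the line list (early exit),
--     instead of one forward pass overwriting three accumulators."""
--     lines = settings_text.splitlines()
--
--     def last_value(prefix):
--         for line in reversed(lines):
--             if line.strip().startswith(prefix):
--                 return line.split(":", 1)[1].strip()
--         return None
--
--     port = last_value("port:")
--     webpath = last_value("webBasePath:")
--     if webpath is not None:
--         webpath = webpath.strip('/')
--     access_url = last_value("Access URL:")
--     return port, webpath, access_url
-- ===== Notes on version B (the rewrite author's own statement) =====
-- stated objective: alternative
-- what changed: Replaces the single forward line loop that overwrites three accumulators (last-wins) with three independent backward scans over the line list, each returning the first match from the end (early exit), with the slash-stripping applied once to the webBasePath result.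
import Mathlib
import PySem

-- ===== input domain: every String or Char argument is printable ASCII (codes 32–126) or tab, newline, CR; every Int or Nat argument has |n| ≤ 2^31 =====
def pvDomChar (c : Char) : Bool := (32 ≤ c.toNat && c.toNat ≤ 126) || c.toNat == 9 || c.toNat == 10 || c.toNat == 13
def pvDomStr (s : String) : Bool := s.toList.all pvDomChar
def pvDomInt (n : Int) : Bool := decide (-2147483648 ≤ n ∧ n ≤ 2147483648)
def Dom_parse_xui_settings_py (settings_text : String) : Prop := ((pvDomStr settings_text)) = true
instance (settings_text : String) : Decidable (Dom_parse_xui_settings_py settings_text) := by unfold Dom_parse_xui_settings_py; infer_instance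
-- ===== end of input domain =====

-- B replaces A's single forward loop updating three last-wins accumulators by three
-- independent backward scans (first match from the end, early exit): alternative decomposition.

-- ===== PORT A =====
-- line.split(":", 1)[1]: in A this is only evaluated on lines whose stripped form starts
-- with "<key>:", so a colon exists and index 1 is present; the getD default is unreachable.
def pvAfterColonA (line : String) : String :=
  ((PySem.Str.splitMax? line ":" 1).getD []).getD 1 ""

def parse_xui_settings_py (settings_text : String) : Option String × Option String × Option String :=
  (PySem.Str.splitlines settings_text).foldl
    (fun st line =>
      if PySem.Str.startswith (PySem.Str.strip line) "port:" then
        (some (PySem.Str.strip (pvAfterColonA line)), st.2.1, st.2.2)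
      else if PySem.Str.startswith (PySem.Str.strip line) "webBasePath:" then
        (st.1, some (PySem.Str.stripChars (PySem.Str.strip (pvAfterColonA line)) "/"), st.2.2)
      else if PySem.Str.startswith (PySem.Str.strip line) "Access URL:" then
        (st.1, st.2.1, some (PySem.Str.strip (pvAfterColonA line)))
      else st)
    (none, none, none)

-- ===== PORT B =====
-- Source B's `for line in reversed(lines): if …: return …; return None` is find? on the reversed list.
def pvLastValueB (lines : List String) (pre : String) : Option String :=
  match lines.reverse.find? (fun line => PySem.Str.startswith (PySem.Str.strip line) pre) with
  | some line => some (PySem.Str.strip (((PySem.Str.splitMax? line ":" 1).getD []).getD 1 ""))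
  | none => none

def parse_xui_settings_py_alt (settings_text : String) : Option String × Option String × Option String :=
  let lines := PySem.Str.splitlines settings_text
  let port := pvLastValueB lines "port:"
  let webpath := (pvLastValueB lines "webBasePath:").map (fun w => PySem.Str.stripChars w "/")
  let access_url := pvLastValueB lines "Access URL:"
  (port, webpath, access_url)

-- ===== PRECONDITION & SPEC =====
def Spec_parse_xui_settings_py (settings_text : String) (out : Option String × Option String × Option String) : Prop := out = parse_xui_settings_py_alt settings_text
instance (settings_text : String) (out : Option String × Option String × Option String) : Decidable (Spec_parse_xui_settings_py settings_text out) := by unfold Spec_parse_xui_settings_py; infer_instance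

-- ===== CLAIM (what is proved, stated in full; the proofs are below) =====
def Claim_equal_parse_xui_settings_py : Prop := ∀ (settings_text : String), Dom_parse_xui_settings_py settings_text → Spec_parse_xui_settings_py settings_text (parse_xui_settings_py settings_text)

-- ===== LEMMAS AND PROOFS =====

-- a nonempty prefix determines the head of the list
theorem pv_head?_of_prefix {p s : List Char} (h : p <+: s) (hne : p ≠ []) :
    s.head? = p.head? := by
  obtain ⟨u, rfl⟩ := h
  cases p with
  | nil => exact absurd rfl hne
  | cons a l => simp

-- the three key prefixes are mutually exclusive (distinct first characters)
theorem pv_excl (t : String) (p q : String)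
    (hp : p.toList.head? = some 'p' ∨ p.toList.head? = some 'w' ∨ p.toList.head? = some 'A')
    (hq : q.toList.head? = some 'p' ∨ q.toList.head? = some 'w' ∨ q.toList.head? = some 'A')
    (hne : p.toList.head? ≠ q.toList.head?)
    (h : PySem.Str.startswith t p = true) : PySem.Str.startswith t q = false := by
  by_contra hcon
  rw [Bool.not_eq_false] at hcon
  rw [PySem.Str.startswith_eq, PySem.Chars.startswith_iff] at h hcon
  have hpne : p.toList ≠ [] := by
    rcases hp with h' | h' | h' <;> (intro e; rw [e] at h'; simp at h')
  have hqne : q.toList ≠ [] := by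
    rcases hq with h' | h' | h' <;> (intro e; rw [e] at h'; simp at h')
  exact hne ((pv_head?_of_prefix h hpne).symm.trans (pv_head?_of_prefix hcon hqne))

theorem pv_c1_c2 (l : String) (h : PySem.Str.startswith (PySem.Str.strip l) "port:" = true) :
    PySem.Str.startswith (PySem.Str.strip l) "webBasePath:" = false :=
  pv_excl _ _ _ (Or.inl rfl) (Or.inr (Or.inl rfl)) (by decide) h

theorem pv_c1_c3 (l : String) (h : PySem.Str.startswith (PySem.Str.strip l) "port:" = true) :
    PySem.Str.startswith (PySem.Str.strip l) "Access URL:" = false :=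
  pv_excl _ _ _ (Or.inl rfl) (Or.inr (Or.inr rfl)) (by decide) h

theorem pv_c2_c3 (l : String) (h : PySem.Str.startswith (PySem.Str.strip l) "webBasePath:" = true) :
    PySem.Str.startswith (PySem.Str.strip l) "Access URL:" = false :=
  pv_excl _ _ _ (Or.inr (Or.inl rfl)) (Or.inr (Or.inr rfl)) (by decide) h

-- abbreviations used only by the proofs
def pvC (pre : String) (line : String) : Bool := PySem.Str.startswith (PySem.Str.strip line) pre
def pvF (line : String) : String := PySem.Str.strip (pvAfterColonA line)
def pvUpd (pre : String) (lines : List String) (x : Option String) (g : String → String) : Option String :=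
  match lines.reverse.find? (pvC pre) with
  | some l => some (g (pvF l))
  | none => x

-- the forward last-wins fold, component by component, equals first-match-from-the-end
theorem pv_fold_eq (lines : List String) (s : Option String × Option String × Option String) :
    lines.foldl
      (fun st line =>
        if pvC "port:" line then (some (pvF line), st.2.1, st.2.2)
        else if pvC "webBasePath:" line then
          (st.1, some (PySem.Str.stripChars (pvF line) "/"), st.2.2)
        else if pvC "Access URL:" line then (st.1, st.2.1, some (pvF line))
        else st)
      s
    = (pvUpd "port:" lines s.1 id,
       pvUpd "webBasePath:" lines s.2.1 (fun w => PySem.Str.stripChars w "/"),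
       pvUpd "Access URL:" lines s.2.2 id) := by
  induction lines generalizing s with
  | nil => simp [pvUpd]
  | cons l ls ih =>
    rw [List.foldl_cons, ih]
    by_cases h1 : pvC "port:" l
    · have h2 : pvC "webBasePath:" l = false := pv_c1_c2 l h1
      have h3 : pvC "Access URL:" l = false := pv_c1_c3 l h1
      cases hA : ls.reverse.find? (pvC "port:") <;>
      cases hB : ls.reverse.find? (pvC "webBasePath:") <;>
      cases hC : ls.reverse.find? (pvC "Access URL:") <;>
      simp [pvUpd, List.find?, h1, h2, h3, hA, hB, hC, Option.or]
    · by_cases h2 : pvC "webBasePath:" l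
      · have h3 : pvC "Access URL:" l = false := pv_c2_c3 l h2
        cases hA : ls.reverse.find? (pvC "port:") <;>
        cases hB : ls.reverse.find? (pvC "webBasePath:") <;>
        cases hC : ls.reverse.find? (pvC "Access URL:") <;>
        simp [pvUpd, List.find?, h1, h2, h3, hA, hB, hC, Option.or]
      · by_cases h3 : pvC "Access URL:" l <;>
        · cases hA : ls.reverse.find? (pvC "port:") <;>
          cases hB : ls.reverse.find? (pvC "webBasePath:") <;>
          cases hC : ls.reverse.find? (pvC "Access URL:") <;>
          simp [pvUpd, List.find?, h1, h2, h3, hA, hB, hC, Option.or]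

theorem pv_upd_map (pre : String) (lines : List String) (g : String → String) :
    (pvUpd pre lines none id).map g = pvUpd pre lines none g := by
  unfold pvUpd
  cases lines.reverse.find? (pvC pre) <;> rfl

theorem pv_lastValue_eq (lines : List String) (pre : String) :
    pvLastValueB lines pre = pvUpd pre lines none id := by
  rfl

-- ===== VERDICT (by name: the statement is the Claim_ definition above) =====
theorem parse_xui_settings_py_spec : Claim_equal_parse_xui_settings_py := by
  intro settings_text _
  unfold Spec_parse_xui_settings_py parse_xui_settings_py parse_xui_settings_py_alt
  have := pv_fold_eq (PySem.Str.splitlines settings_text) (none, none, none)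
  simp only [pvC, pvF] at this
  rw [this]
  simp only [pv_lastValue_eq, pv_upd_map]
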